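-- pv_equiv track=rewrite | github.com/lion-oh/Coding-Study | Day_3/3일차_구명보트.py | solution
-- ===== SOURCE A (Python) =====
-- def solution(people, limit):
--     """
--
--     :param people: 무인도에 갇힌 사람의 몸무게
--     :param limit: 구명보트 무게 제한
--     :return: 모든 사람을 구출하기 위해 필요한 구명보트 개수의 최솟값
--     """
--     origin_p = sorted(people)
--     limit = limit
--
--     cnt = 0
--     idx = 0  # first
--
--     while True:
--         try:
--             if origin_p[idx] + origin_p[idx+1] <= limit:
--                 cnt += 1
--                 origin_p.remove(origin_p[idx])
--                 origin_p.remove(origin_p[idx])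
--             else:
--                 cnt += 2
--                 origin_p.remove(origin_p[idx])
--                 origin_p.remove(origin_p[idx])
--         except:
--             pass
--
--         if len(origin_p) == 1:
--             cnt += 1
--             break
--         elif len(origin_p) == 0:
--             break
--     return cnt
-- ===== SOURCE B (Python) =====
-- def solution(people, limit):
--     s = sorted(people)
--     cnt = len(s) % 2
--     it = iter(s)
--     for a, b in zip(it, it):
--         cnt += 1 if a + b <= limit else 2
--     return cnt
-- ===== Notes on version B (the rewrite author's own statement) =====
-- stated objective: faster
-- what changed: Replaced the while-loop that repeatedly calls list.remove (O(n) each) with a single pass over consecutive pairs of the sorted list, counting 1 or 2 per pair plus 1 for an odd leftover.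
import Mathlib
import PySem

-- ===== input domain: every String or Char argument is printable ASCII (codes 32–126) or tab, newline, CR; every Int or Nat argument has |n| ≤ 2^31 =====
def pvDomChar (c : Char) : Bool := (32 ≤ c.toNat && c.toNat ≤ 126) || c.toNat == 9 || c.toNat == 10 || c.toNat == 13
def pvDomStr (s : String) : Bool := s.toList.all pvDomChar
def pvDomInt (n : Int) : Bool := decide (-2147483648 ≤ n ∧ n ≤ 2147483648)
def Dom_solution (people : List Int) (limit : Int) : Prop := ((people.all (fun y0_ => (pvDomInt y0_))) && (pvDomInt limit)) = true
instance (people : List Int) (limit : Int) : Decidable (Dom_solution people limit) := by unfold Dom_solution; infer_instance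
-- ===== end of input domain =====

-- B replaces A's remove-two-smallest while loop by a single pass over consecutive pairs of
-- the sorted list (no repeated list.remove); one boat per pair under the limit, two otherwise,
-- plus one for an odd leftover.

-- ===== PORT A =====
-- A's while loop. Each iteration reads origin_p[0] and origin_p[1]; with fewer than 2
-- elements that raises and the bare except leaves the list unchanged ('pass'), after which
-- the len==1 / len==0 checks break. 'origin_p.remove(origin_p[0])' removes the first
-- occurrence of the head's value, which is the head itself, so the two removes drop the
-- first two elements (exact).
def solutionLoop (limit : Int) : List Int → Int → Int
  | [], cnt => cnt                      -- try raises, pass; len == 0 → break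
  | [_], cnt => cnt + 1                 -- try raises, pass; len == 1 → cnt += 1, break
  | a :: b :: rest, cnt =>
      let cnt' := if a + b ≤ limit then cnt + 1 else cnt + 2
      if rest.length == 1 then cnt' + 1
      else if rest.length == 0 then cnt'
      else solutionLoop limit rest cnt'

def solution (people : List Int) (limit : Int) : Int :=
  let origin_p := PySem.List.sorted people (fun x => x)
  solutionLoop limit origin_p 0

-- ===== PORT B =====
-- the pairs produced by zip(it, it) over the sorted list
def solutionPairs : List Int → List (Int × Int)
  | a :: b :: rest => (a, b) :: solutionPairs rest
  | _ => []

def solution_alt (people : List Int) (limit : Int) : Int :=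
  let s := PySem.List.sorted people (fun x => x)
  let cnt : Int := (s.length : Int) % 2
  (solutionPairs s).foldl (fun c p => c + (if p.1 + p.2 ≤ limit then 1 else 2)) cnt

-- ===== PRECONDITION & SPEC =====
def Spec_solution (people : List Int) (limit : Int) (out : Int) : Prop := out = solution_alt people limit
instance (people : List Int) (limit : Int) (out : Int) : Decidable (Spec_solution people limit out) := by unfold Spec_solution; infer_instance

-- ===== CLAIM (what is proved, stated in full; the proofs are below) =====
def Claim_equal_solution : Prop := ∀ (people : List Int) (limit : Int), Dom_solution people limit → Spec_solution people limit (solution people limit)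

-- ===== LEMMAS AND PROOFS =====
-- cost of the pair pass, as a plain recursive sum (proof helper)
def pairSum (limit : Int) : List Int → Int
  | a :: b :: r => (if a + b ≤ limit then 1 else 2) + pairSum limit r
  | _ => 0

theorem foldl_pairSum (limit : Int) : ∀ (r : List Int) (x : Int),
    (solutionPairs r).foldl (fun c p => c + (if p.1 + p.2 ≤ limit then 1 else 2)) x
      = x + pairSum limit r
  | [], x => by simp [solutionPairs, pairSum]
  | [a], x => by simp [solutionPairs, pairSum]
  | a :: b :: r, x => by
      simp only [solutionPairs, List.foldl_cons]
      rw [foldl_pairSum limit r]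
      simp only [pairSum]
      ring

theorem solutionLoop_eq (limit : Int) :
    ∀ (l : List Int) (cnt : Int),
      solutionLoop limit l cnt = cnt + ((l.length : Int) % 2) + pairSum limit l
  | [], cnt => by simp [solutionLoop, pairSum]
  | [a], cnt => by norm_num [solutionLoop, pairSum]
  | [a, b], cnt => by
      norm_num [solutionLoop, pairSum]
      split_ifs <;> omega
  | [a, b, c], cnt => by
      norm_num [solutionLoop, pairSum]
      split_ifs <;> omega
  | a :: b :: c :: d :: u, cnt => by
      have ih := solutionLoop_eq limit (c :: d :: u)
        (if a + b ≤ limit then cnt + 1 else cnt + 2)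
      simp only [solutionLoop, pairSum, List.length_cons, beq_iff_eq] at ih ⊢
      rw [ih]
      generalize pairSum limit u = S
      split_ifs <;> first | contradiction | omega

-- ===== VERDICT (by name: the statement is the Claim_ definition above) =====
theorem solution_spec : Claim_equal_solution := by
  intro people limit _
  unfold Spec_solution solution solution_alt
  rw [solutionLoop_eq, foldl_pairSum]
  ring
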